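-- pv_equiv track=rewrite | github.com/Ricardouchub/Proyecto-clima-Chile-API-dashboard | extractor_clima_script.py | agrupar_rangos_meses
-- ===== SOURCE A (Python) =====
-- def agrupar_rangos_meses(meses_faltantes):
--     if not meses_faltantes:
--         return []
--     meses_ordenados = sorted(meses_faltantes)
--     rangos = []
--     inicio_anio, inicio_mes = meses_ordenados[0]
--     prev_anio, prev_mes = inicio_anio, inicio_mes
--     for anio, mes in meses_ordenados[1:]:
--         prev_key = prev_anio * 12 + prev_mes
--         curr_key = anio * 12 + mes
--         if curr_key == prev_key + 1:
--             prev_anio, prev_mes = anio, mes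
--             continue
--         rangos.append((inicio_anio, inicio_mes, prev_anio, prev_mes))
--         inicio_anio, inicio_mes = anio, mes
--         prev_anio, prev_mes = anio, mes
--     rangos.append((inicio_anio, inicio_mes, prev_anio, prev_mes))
--     return rangos
-- ===== SOURCE B (Python) =====
-- def agrupar_rangos_meses(meses_faltantes):
--     if not meses_faltantes:
--         return []
--     # Label each sorted month by (scalar month index) - (position): runs of
--     # consecutive months share a label, so grouping equal labels yields the ranges.
--     etiquetados = [(a * 12 + m - i, (a, m))
--                    for i, (a, m) in enumerate(sorted(meses_faltantes))]
--     rangos = []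
--     while etiquetados:
--         clave = etiquetados[0][0]
--         k = 1
--         while k < len(etiquetados) and etiquetados[k][0] == clave:
--             k += 1
--         grupo = etiquetados[:k]
--         rangos.append((grupo[0][1][0], grupo[0][1][1],
--                        grupo[-1][1][0], grupo[-1][1][1]))
--         etiquetados = etiquetados[k:]
--     return rangos
-- ===== Notes on version B (the rewrite author's own statement) =====
-- stated objective: alternative
-- what changed: Replaces A's running inicio/prev state machine over the sorted list by a label-and-group decomposition: each sorted month gets the label (year*12+month)-position, so consecutive months share a label, and maximal runs of equal labels are sliced off and emitted as ranges.
import Mathlib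
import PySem

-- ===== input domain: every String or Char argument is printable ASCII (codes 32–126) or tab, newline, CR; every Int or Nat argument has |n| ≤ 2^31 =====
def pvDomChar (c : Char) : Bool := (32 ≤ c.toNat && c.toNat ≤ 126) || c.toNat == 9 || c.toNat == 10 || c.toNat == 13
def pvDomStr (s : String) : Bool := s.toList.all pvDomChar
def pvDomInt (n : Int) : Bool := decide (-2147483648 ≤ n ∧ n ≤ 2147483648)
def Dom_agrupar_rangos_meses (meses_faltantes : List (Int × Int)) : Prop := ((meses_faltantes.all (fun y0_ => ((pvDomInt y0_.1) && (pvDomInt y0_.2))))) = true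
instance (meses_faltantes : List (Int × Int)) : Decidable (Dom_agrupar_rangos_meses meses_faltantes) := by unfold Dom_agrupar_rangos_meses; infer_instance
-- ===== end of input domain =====

-- B replaces A's running inicio/prev state machine by a label-and-group decomposition
-- (scalar month index minus position labels each sorted month; equal labels are grouped);
-- objective: alternative decomposition, same cost.

-- ===== PORT A =====
def agrupar_rangos_meses (meses_faltantes : List (Int × Int)) : List (Int × Int × Int × Int) :=
  if meses_faltantes = [] then []
  else
    match PySem.List.sorted2 meses_faltantes Prod.fst Prod.snd with
    | [] => []   -- unreachable: sorted of a nonempty list is nonempty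
    | (ia, im) :: resto =>
      -- state: (rangos, (inicio_anio, inicio_mes), (prev_anio, prev_mes))
      let st := resto.foldl
        (fun (st : List (Int × Int × Int × Int) × (Int × Int) × (Int × Int)) am =>
          let (rangos, ini, prev) := st
          let (anio, mes) := am
          if anio * 12 + mes = prev.1 * 12 + prev.2 + 1 then
            (rangos, ini, (anio, mes))
          else
            (rangos ++ [(ini.1, ini.2, prev.1, prev.2)], (anio, mes), (anio, mes)))
        ([], (ia, im), (ia, im))
      st.1 ++ [(st.2.1.1, st.2.1.2, st.2.2.1, st.2.2.2)]

-- ===== PORT B =====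
-- label list: [(a*12 + m - i, (a, m)) for i, (a, m) in enumerate(s)]
def pvEtiquetar (s : List (Int × Int)) : List (Int × (Int × Int)) :=
  (PySem.List.enumerate s).map (fun p => (p.2.1 * 12 + p.2.2 - p.1, p.2))

-- the inner while/slicing loop of Source B: peel off one maximal run of equal labels at a time
def pvGrupos (xs : List (Int × (Int × Int))) : List (List (Int × (Int × Int))) :=
  match xs with
  | [] => []
  | x :: t =>
    (x :: t.takeWhile (fun y => y.1 == x.1)) :: pvGrupos (t.dropWhile (fun y => y.1 == x.1))
termination_by xs.length
decreasing_by
  exact Nat.lt_succ_of_le (List.length_dropWhile_le _ _)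

-- (grupo[0][1][0], grupo[0][1][1], grupo[-1][1][0], grupo[-1][1][1]); groups are nonempty
def pvRango (g : List (Int × (Int × Int))) : Int × Int × Int × Int :=
  ((g.headD (0, 0, 0)).2.1, (g.headD (0, 0, 0)).2.2,
   (g.getLastD (0, 0, 0)).2.1, (g.getLastD (0, 0, 0)).2.2)

def agrupar_rangos_meses_alt (meses_faltantes : List (Int × Int)) : List (Int × Int × Int × Int) :=
  if meses_faltantes = [] then []
  else
    (pvGrupos (pvEtiquetar (PySem.List.sorted2 meses_faltantes Prod.fst Prod.snd))).map pvRango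

-- ===== PRECONDITION & SPEC =====
def Spec_agrupar_rangos_meses (meses_faltantes : List (Int × Int)) (out : List (Int × Int × Int × Int)) : Prop := out = agrupar_rangos_meses_alt meses_faltantes
instance (meses_faltantes : List (Int × Int)) (out : List (Int × Int × Int × Int)) : Decidable (Spec_agrupar_rangos_meses meses_faltantes out) := by unfold Spec_agrupar_rangos_meses; infer_instance

-- ===== CLAIM (what is proved, stated in full; the proofs are below) =====
def Claim_equal_agrupar_rangos_meses : Prop := ∀ (meses_faltantes : List (Int × Int)), Dom_agrupar_rangos_meses meses_faltantes → Spec_agrupar_rangos_meses meses_faltantes (agrupar_rangos_meses meses_faltantes)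

-- ===== LEMMAS AND PROOFS =====

-- the ranges A's loop produces from tail t with current start ini and previous element prev
def pvRuns (t : List (Int × Int)) (ini prev : Int × Int) : List (Int × Int × Int × Int) :=
  match t with
  | [] => [(ini.1, ini.2, prev.1, prev.2)]
  | (a, m) :: t' =>
    if a * 12 + m = prev.1 * 12 + prev.2 + 1 then pvRuns t' ini (a, m)
    else (ini.1, ini.2, prev.1, prev.2) :: pvRuns t' (a, m) (a, m)

-- labelled list with explicit starting index
def pvLab (i : Int) (s : List (Int × Int)) : List (Int × (Int × Int)) :=
  match s with
  | [] => []
  | (a, m) :: t => (a * 12 + m - i, (a, m)) :: pvLab (i + 1) t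

lemma pvEtiquetar_lab (s : List (Int × Int)) : ∀ i, (PySem.List.enumerate s i).map (fun p => (p.2.1 * 12 + p.2.2 - p.1, p.2)) = pvLab i s := by
  induction s with
  | nil => intro i; simp [PySem.List.enumerate_nil, pvLab]
  | cons x t ih =>
    intro i
    obtain ⟨a, m⟩ := x
    simp [PySem.List.enumerate_cons, pvLab, ih]

-- A's fold equals pvRuns
lemma foldA_runs (t : List (Int × Int)) : ∀ (rangos : List (Int × Int × Int × Int)) (ini prev : Int × Int),
    (let st := t.foldl
        (fun (st : List (Int × Int × Int × Int) × (Int × Int) × (Int × Int)) am =>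
          let (rs, ini, prev) := st
          let (anio, mes) := am
          if anio * 12 + mes = prev.1 * 12 + prev.2 + 1 then
            (rs, ini, (anio, mes))
          else
            (rs ++ [(ini.1, ini.2, prev.1, prev.2)], (anio, mes), (anio, mes)))
        (rangos, ini, prev)
     st.1 ++ [(st.2.1.1, st.2.1.2, st.2.2.1, st.2.2.2)]) = rangos ++ pvRuns t ini prev := by
  induction t with
  | nil => intro rangos ini prev; simp [pvRuns]
  | cons x t' ih =>
    intro rangos ini prev
    obtain ⟨a, m⟩ := x
    by_cases h : a * 12 + m = prev.1 * 12 + prev.2 + 1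
    · simp only [List.foldl_cons, pvRuns, h, if_true]
      simpa [h] using ih rangos ini (a, m)
    · simp only [List.foldl_cons, pvRuns, if_neg h]
      simpa [h, List.append_assoc] using ih (rangos ++ [(ini.1, ini.2, prev.1, prev.2)]) (a, m) (a, m)

-- replace the start of the first range
def pvSetStart (ini : Int × Int) (l : List (Int × Int × Int × Int)) : List (Int × Int × Int × Int) :=
  match l with
  | [] => []
  | r :: rs => (ini.1, ini.2, r.2.2.1, r.2.2.2) :: rs

-- main bridge: grouping the labelled tail equals A's run recursion, with the first
-- range's start overridden by ini
lemma grupos_runs (t : List (Int × Int)) : ∀ (i : Int) (ini prev : Int × Int),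
    pvSetStart ini ((pvGrupos (pvLab i (prev :: t))).map pvRango) = pvRuns t ini prev := by
  induction t with
  | nil =>
    intro i ini prev
    obtain ⟨pa, pm⟩ := prev
    simp [pvLab, pvGrupos, pvRango, pvSetStart, pvRuns]
  | cons q t' ih =>
    intro i ini prev
    obtain ⟨pa, pm⟩ := prev
    obtain ⟨qa, qm⟩ := q
    have hexp : pvLab i ((pa, pm) :: (qa, qm) :: t')
        = (pa * 12 + pm - i, (pa, pm)) :: (qa * 12 + qm - (i + 1), (qa, qm)) :: pvLab (i + 1 + 1) t' := rfl
    have hexp1 : pvLab (i + 1) ((qa, qm) :: t')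
        = (qa * 12 + qm - (i + 1), (qa, qm)) :: pvLab (i + 1 + 1) t' := rfl
    by_cases h : qa * 12 + qm = pa * 12 + pm + 1
    · -- labels of prev (at i) and q (at i + 1) coincide: one group continues
      have hlab : qa * 12 + qm - (i + 1) = pa * 12 + pm - i := by omega
      rw [pvRuns, if_pos h, ← ih (i + 1) ini (qa, qm), hexp, hexp1]
      rw [pvGrupos, pvGrupos]
      rw [List.takeWhile_cons, List.dropWhile_cons]
      simp only [hlab, beq_self_eq_true, if_true]
      simp [pvSetStart, pvRango]
    · -- labels differ: the group containing prev closes here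
      have hlab : ¬ (qa * 12 + qm - (i + 1) = pa * 12 + pm - i) := by omega
      have hlabb : ((qa * 12 + qm - (i + 1) : Int) == pa * 12 + pm - i) = false := by
        simpa using hlab
      rw [pvRuns, if_neg h, ← ih (i + 1) (qa, qm) (qa, qm), hexp, hexp1]
      rw [pvGrupos]
      rw [List.takeWhile_cons, List.dropWhile_cons]
      simp only [hlabb, Bool.false_eq_true, if_false]
      have hid : (pvGrupos ((qa * 12 + qm - (i + 1), (qa, qm)) :: pvLab (i + 1 + 1) t')).map pvRango
          = pvSetStart (qa, qm) ((pvGrupos ((qa * 12 + qm - (i + 1), (qa, qm)) :: pvLab (i + 1 + 1) t')).map pvRango) := by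
        rw [pvGrupos]
        simp [pvSetStart, pvRango]
      simp only [List.map_cons]
      rw [← hid]
      simp [pvSetStart, pvRango]

-- B's head group starts at the head of the sorted list, so pvSetStart is the identity on it
lemma alt_setStart (p : Int × Int) (t : List (Int × Int)) :
    (pvGrupos (pvLab 0 (p :: t))).map pvRango
      = pvSetStart p ((pvGrupos (pvLab 0 (p :: t))).map pvRango) := by
  obtain ⟨a, m⟩ := p
  rw [show pvLab 0 ((a, m) :: t) = (a * 12 + m - 0, (a, m)) :: pvLab 1 t from rfl]
  rw [pvGrupos]
  simp [pvSetStart, pvRango]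

-- ===== VERDICT (by name: the statement is the Claim_ definition above) =====
theorem agrupar_rangos_meses_spec : Claim_equal_agrupar_rangos_meses := by
  intro ms _
  unfold Spec_agrupar_rangos_meses agrupar_rangos_meses agrupar_rangos_meses_alt
  by_cases hms : ms = []
  · simp [hms]
  · rw [if_neg hms, if_neg hms]
    have hperm := PySem.List.sorted2_perm ms (Prod.fst : Int × Int → Int) (Prod.snd : Int × Int → Int) false
    have hs : PySem.List.sorted2 ms Prod.fst Prod.snd ≠ [] := by
      intro hnil
      exact hms ((hnil ▸ hperm).symm.eq_nil)
    obtain ⟨p, t, hst⟩ := List.exists_cons_of_ne_nil hs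
    rw [hst]
    obtain ⟨ia, im⟩ := p
    rw [pvEtiquetar, pvEtiquetar_lab]
    rw [alt_setStart, grupos_runs]
    simpa using foldA_runs t [] (ia, im) (ia, im)
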